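-- pv_equiv track=rewrite | github.com/amegoly/antitrust-analysis | antitrust analysis.py | identify_regulators
-- ===== SOURCE A (Python) =====
-- def identify_regulators(bidder_countries, target_countries):
--     regulators = []
--
--     if any(country in ["USA", "United States", "US"] for country in bidder_countries + target_countries):
--         regulators.extend(["FTC", "DOJ", "FCC", "SEC"])
--
--     if any(country in ["EU", "European Union"] for country in bidder_countries + target_countries):
--         regulators.append("DG COMP")
--
--     if "Germany" in bidder_countries + target_countries:
--         regulators.append("Bundeskartellamt")
--
--     if "France" in bidder_countries + target_countries:
--         regulators.append("Autorité de la Concurrence")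
--
--     if "China" in bidder_countries + target_countries:
--         regulators.extend(["SAMR", "MOFCOM"])
--
--     return regulators
-- ===== SOURCE B (Python) =====
-- # Inverted index: map each trigger country to a rule id, make one pass over the
-- # countries collecting the set of fired rule ids, then emit regulators rule by rule.
-- COUNTRY_RULE = {
--     "USA": 0, "United States": 0, "US": 0,
--     "EU": 1, "European Union": 1,
--     "Germany": 2,
--     "France": 3,
--     "China": 4,
-- }
--
-- RULE_REGS = [
--     ["FTC", "DOJ", "FCC", "SEC"],
--     ["DG COMP"],
--     ["Bundeskartellamt"],
--     ["Autorit\u00e9 de la Concurrence"],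
--     ["SAMR", "MOFCOM"],
-- ]
--
--
-- def identify_regulators(bidder_countries, target_countries):
--     fired = set()
--     for c in bidder_countries:
--         r = COUNTRY_RULE.get(c)
--         if r is not None:
--             fired.add(r)
--     for c in target_countries:
--         r = COUNTRY_RULE.get(c)
--         if r is not None:
--             fired.add(r)
--     out = []
--     for i, regs in enumerate(RULE_REGS):
--         if i in fired:
--             out.extend(regs)
--     return out
-- ===== Notes on version B (the rewrite author's own statement) =====
-- stated objective: alternative
-- what changed: Inverts the traversal: instead of scanning the country lists once per rule, B makes a single pass over the countries with an inverted index (country -> rule id) collecting the set of fired rule ids, then emits each fired rule's regulators in rule order.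
import Mathlib
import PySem

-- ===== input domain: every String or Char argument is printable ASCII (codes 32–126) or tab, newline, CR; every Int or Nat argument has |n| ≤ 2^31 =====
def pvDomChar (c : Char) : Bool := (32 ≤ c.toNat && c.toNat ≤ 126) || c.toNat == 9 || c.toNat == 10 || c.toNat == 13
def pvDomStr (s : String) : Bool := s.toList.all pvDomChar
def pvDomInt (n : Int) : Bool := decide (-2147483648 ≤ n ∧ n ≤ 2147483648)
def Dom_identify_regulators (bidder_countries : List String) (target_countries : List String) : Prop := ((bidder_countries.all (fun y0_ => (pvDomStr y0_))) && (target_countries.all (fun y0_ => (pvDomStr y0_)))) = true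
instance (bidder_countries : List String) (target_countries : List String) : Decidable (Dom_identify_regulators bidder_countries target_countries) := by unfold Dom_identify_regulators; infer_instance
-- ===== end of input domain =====

-- B inverts the traversal: instead of scanning the country lists once per rule, it makes one
-- pass over the countries with an inverted index (country -> rule id), collects the set of
-- fired rule ids, then emits each fired rule's regulators in rule order (objective: alternative).

-- ===== PORT A =====
def identify_regulators (bidder_countries : List String) (target_countries : List String) : List String :=
  let regulators : List String := []
  let regulators := if (bidder_countries ++ target_countries).any
      (fun country => ["USA", "United States", "US"].contains country)
    then regulators ++ ["FTC", "DOJ", "FCC", "SEC"] else regulators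
  let regulators := if (bidder_countries ++ target_countries).any
      (fun country => ["EU", "European Union"].contains country)
    then regulators ++ ["DG COMP"] else regulators
  let regulators := if (bidder_countries ++ target_countries).contains "Germany"
    then regulators ++ ["Bundeskartellamt"] else regulators
  let regulators := if (bidder_countries ++ target_countries).contains "France"
    then regulators ++ ["Autorité de la Concurrence"] else regulators
  let regulators := if (bidder_countries ++ target_countries).contains "China"
    then regulators ++ ["SAMR", "MOFCOM"] else regulators
  regulators

-- ===== PORT B =====
-- COUNTRY_RULE: the inverted index country -> rule id
def pvCountryRule : PySem.Dict String Int :=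
  PySem.Dict.ofList
    [("USA", 0), ("United States", 0), ("US", 0),
     ("EU", 1), ("European Union", 1),
     ("Germany", 2), ("France", 3), ("China", 4)]

-- RULE_REGS
def pvRuleRegs : List (List String) :=
  [["FTC", "DOJ", "FCC", "SEC"],
   ["DG COMP"],
   ["Bundeskartellamt"],
   ["Autorité de la Concurrence"],
   ["SAMR", "MOFCOM"]]

-- body of the two 'for c in …' loops: r = COUNTRY_RULE.get(c); if r is not None: fired.add(r)
def pvStep (fired : PySem.Set Int) (c : String) : PySem.Set Int :=
  match pvCountryRule.get? c with
  | some r => PySem.Set.add fired r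
  | none => fired

def identify_regulators_alt (bidder_countries : List String) (target_countries : List String) : List String :=
  let fired : PySem.Set Int :=
    target_countries.foldl pvStep (bidder_countries.foldl pvStep PySem.Set.empty)
  (pvRuleRegs.zipIdx).foldl
    (fun out p => if PySem.Set.contains fired (p.2 : Int) then out ++ p.1 else out) []

-- ===== PRECONDITION & SPEC =====
def Spec_identify_regulators (bidder_countries : List String) (target_countries : List String) (out : List String) : Prop := out = identify_regulators_alt bidder_countries target_countries
instance (bidder_countries : List String) (target_countries : List String) (out : List String) : Decidable (Spec_identify_regulators bidder_countries target_countries out) := by unfold Spec_identify_regulators; infer_instance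

-- ===== CLAIM (what is proved, stated in full; the proofs are below) =====
def Claim_equal_identify_regulators : Prop := ∀ (bidder_countries : List String) (target_countries : List String), Dom_identify_regulators bidder_countries target_countries → Spec_identify_regulators bidder_countries target_countries (identify_regulators bidder_countries target_countries)

-- ===== LEMMAS AND PROOFS =====

theorem pvCountryRule_mk : pvCountryRule = PySem.Dict.mk
    [("USA", 0), ("United States", 0), ("US", 0),
     ("EU", 1), ("European Union", 1),
     ("Germany", 2), ("France", 3), ("China", 4)] := by decide

-- membership in the fired set built by folding pvStep
theorem mem_foldl_pvStep (xs : List String) (s : PySem.Set Int) (i : Int) :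
    i ∈ xs.foldl pvStep s ↔ i ∈ s ∨ ∃ c ∈ xs, pvCountryRule.get? c = some i := by
  induction xs generalizing s with
  | nil => simp
  | cons x xs ih =>
    simp only [List.foldl_cons, ih, List.mem_cons]
    unfold pvStep
    cases h : pvCountryRule.get? x with
    | none =>
      constructor
      · rintro (hs | ⟨c, hc, hg⟩)
        · exact Or.inl hs
        · exact Or.inr ⟨c, Or.inr hc, hg⟩
      · rintro (hs | ⟨c, (rfl | hc), hg⟩)
        · exact Or.inl hs
        · rw [h] at hg; cases hg
        · exact Or.inr ⟨c, hc, hg⟩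
    | some r =>
      rw [PySem.Set.mem_add]
      constructor
      · rintro ((hs | rfl) | ⟨c, hc, hg⟩)
        · exact Or.inl hs
        · exact Or.inr ⟨x, Or.inl rfl, h⟩
        · exact Or.inr ⟨c, Or.inr hc, hg⟩
      · rintro (hs | ⟨c, (rfl | hc), hg⟩)
        · exact Or.inl (Or.inl hs)
        · rw [h] at hg; exact Or.inl (Or.inr (Option.some_injective _ hg).symm)
        · exact Or.inr ⟨c, hc, hg⟩

-- the fired set queried at rule id i = A's scan of the concatenation with the rule's trigger test
theorem contains_fired (b t : List String) (i : Int) :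
    PySem.Set.contains (t.foldl pvStep (b.foldl pvStep PySem.Set.empty)) i
      = (b ++ t).any (fun c => pvCountryRule.get? c == some i) := by
  rw [Bool.eq_iff_iff]
  simp only [PySem.Set.contains_iff, mem_foldl_pvStep, List.any_eq_true, beq_iff_eq,
    List.mem_append, PySem.Set.empty]
  constructor
  · rintro ((h | ⟨c, hc, hg⟩) | ⟨c, hc, hg⟩)
    · cases h
    · exact ⟨c, Or.inl hc, hg⟩
    · exact ⟨c, Or.inr hc, hg⟩
  · rintro ⟨c, (hc | hc), hg⟩
    · exact Or.inl (Or.inr ⟨c, hc, hg⟩)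
    · exact Or.inr ⟨c, hc, hg⟩

-- inverted-index lookups, pointwise, against A's trigger tests
theorem pvLookup0 (c : String) :
    (pvCountryRule.get? c == some (0 : Int)) = (["USA", "United States", "US"] : List String).contains c := by
  rw [pvCountryRule_mk]
  simp only [PySem.Dict.get?_mk_cons]
  split_ifs <;> simp_all [PySem.Dict.get?] <;>
    (refine ⟨fun hc => ?_, fun hc => ?_, fun hc => ?_⟩ <;> subst hc <;> simp_all)

theorem pvLookup1 (c : String) :
    (pvCountryRule.get? c == some (1 : Int)) = (["EU", "European Union"] : List String).contains c := by
  rw [pvCountryRule_mk]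
  simp only [PySem.Dict.get?_mk_cons]
  split_ifs <;> simp_all [PySem.Dict.get?] <;>
    (refine ⟨fun hc => ?_, fun hc => ?_⟩ <;> subst hc <;> simp_all)

theorem pvLookup2 (c : String) :
    (pvCountryRule.get? c == some (2 : Int)) = (c == "Germany") := by
  rw [pvCountryRule_mk]
  simp only [PySem.Dict.get?_mk_cons]
  split_ifs <;> simp_all [PySem.Dict.get?] <;> (intro hc; subst hc; simp_all)

theorem pvLookup3 (c : String) :
    (pvCountryRule.get? c == some (3 : Int)) = (c == "France") := by
  rw [pvCountryRule_mk]
  simp only [PySem.Dict.get?_mk_cons]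
  split_ifs <;> simp_all [PySem.Dict.get?] <;> (intro hc; subst hc; simp_all)

theorem pvLookup4 (c : String) :
    (pvCountryRule.get? c == some (4 : Int)) = (c == "China") := by
  rw [pvCountryRule_mk]
  simp only [PySem.Dict.get?_mk_cons]
  split_ifs <;> simp_all [PySem.Dict.get?] <;> (intro hc; subst hc; simp_all)

theorem any_beq_eq_contains (xs : List String) (a : String) :
    xs.any (fun c => c == a) = xs.contains a := by
  rw [Bool.eq_iff_iff]
  simp [List.any_eq_true]

-- ===== VERDICT (by name: the statement is the Claim_ definition above) =====
theorem identify_regulators_spec : Claim_equal_identify_regulators := by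
  intro b t _
  show identify_regulators b t = identify_regulators_alt b t
  simp only [identify_regulators_alt, pvRuleRegs, List.zipIdx, List.foldl, contains_fired]
  norm_num [pvLookup0, pvLookup1, pvLookup2, pvLookup3, pvLookup4, any_beq_eq_contains,
    identify_regulators, List.contains_iff_mem, List.any_eq_true]
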